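-- pv_equiv track=rewrite | github.com/julgitt/University_tasks | sztuczna_inteligencja/pracownia1/zad5/imageSolver.py | _change_line
-- ===== SOURCE A (Python) =====
-- def _change_line(line: str, block_size: str) -> str:
--     min_operations = float('inf')
--     fixed_line = line
--
--     for i in range(len(line) - block_size + 1):
--         operations = line.count('#', 0, i) + line.count('.', i, i + block_size) + line.count('#', block_size + i, len(line))
--         if min_operations > operations:
--             min_operations = operations
--             fixed_line = '.' * i + '#' * block_size + '.' * (len(line) - block_size - i)
--
--     return fixed_line
-- ===== SOURCE B (Python) =====
-- def _change_line(line: str, block_size: str) -> str: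
--     n = len(line)
--     prefH = [0]
--     prefD = [0]
--     h = d = 0
--     for c in line:
--         h += (c == '#')
--         d += (c == '.')
--         prefH.append(h)
--         prefD.append(d)
--
--     best_cost = None
--     best_i = 0
--     for i in range(n - block_size + 1):
--         cost = prefH[i] \
--             + (prefD[i + block_size] - prefD[i]) \
--             + (prefH[n] - prefH[i + block_size])
--         if best_cost is None or cost < best_cost:
--             best_cost, best_i = cost, i
--
--     if best_cost is None:
--         return line
--     return '.' * best_i + '#' * block_size + '.' * (n - block_size - best_i)
-- ===== Notes on version B (the rewrite author's own statement) =====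
-- stated objective: faster
-- what changed: B precomputes prefix sums of '#' and '.' counts once, so each candidate position costs three O(1) prefix differences instead of three str.count scans, and it tracks only the best index, building the output once at the end; Pre_ excludes negative block sizes, outside the task's natural domain, where A's str.count wraps negative indices and B's prefix lookups raise IndexError.
-- outside the precondition, e.g. on _change_line('#.', -1): A returns '...', B raises IndexError
import Mathlib
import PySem

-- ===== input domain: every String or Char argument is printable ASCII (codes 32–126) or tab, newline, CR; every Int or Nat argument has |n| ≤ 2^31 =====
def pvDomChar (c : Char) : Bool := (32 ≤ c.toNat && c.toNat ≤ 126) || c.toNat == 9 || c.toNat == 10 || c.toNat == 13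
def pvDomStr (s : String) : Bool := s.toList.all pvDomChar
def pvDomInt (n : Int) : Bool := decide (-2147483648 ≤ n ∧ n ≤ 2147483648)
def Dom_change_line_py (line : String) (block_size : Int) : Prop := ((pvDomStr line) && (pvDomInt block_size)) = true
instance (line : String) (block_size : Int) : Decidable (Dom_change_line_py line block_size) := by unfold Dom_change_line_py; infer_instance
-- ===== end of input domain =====

-- B replaces A's three str.count scans per position (O(n^2) total) by two prefix-sum
-- arrays giving each candidate's cost in O(1) (O(n) total); same return value on Pre_.

-- ===== PORT A =====
-- line.count(ch, a, b) is ported as the char-count of the slice line[a:b]; exact for a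
-- one-character needle. float('inf') / the running minimum is ported as Option Int
-- (none = inf), exact because every later value is an int.
def change_line_py (line : String) (block_size : Int) : String :=
  let cs := line.toList
  let n : Int := (cs.length : Int)
  let res := (PySem.List.pyRange 0 (n - block_size + 1)).foldl
    (fun (st : Option Int × List Char) (i : Int) =>
      let operations : Int :=
        ((PySem.List.slice cs (some 0) (some i)).count '#' : Int)
        + ((PySem.List.slice cs (some i) (some (i + block_size))).count '.' : Int)
        + ((PySem.List.slice cs (some (block_size + i)) (some n)).count '#' : Int)
      if (match st.1 with | none => true | some m => decide (operations < m)) then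
        (some operations,
          List.replicate i.toNat '.' ++ List.replicate block_size.toNat '#'
            ++ List.replicate (n - block_size - i).toNat '.')
      else st)
    (none, cs)
  String.ofList res.2

-- ===== PORT B =====
def change_line_py_alt (line : String) (block_size : Int) : String :=
  let cs := line.toList
  let n : Int := (cs.length : Int)
  let pr := cs.foldl
    (fun (st : (Int × Int) × (List Int × List Int)) c =>
      let h := st.1.1 + (if c = '#' then 1 else 0)
      let d := st.1.2 + (if c = '.' then 1 else 0)
      ((h, d), (st.2.1 ++ [h], st.2.2 ++ [d])))
    ((0, 0), ([0], [0]))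
  let prefH := pr.2.1
  let prefD := pr.2.2
  let best := (PySem.List.pyRange 0 (n - block_size + 1)).foldl
    (fun (best : Option Int × Int) (i : Int) =>
      let cost : Int := prefH.getD i.toNat 0
        + (prefD.getD (i + block_size).toNat 0 - prefD.getD i.toNat 0)
        + (prefH.getD cs.length 0 - prefH.getD (i + block_size).toNat 0)
      match best.1 with
      | none => (some cost, i)
      | some m => if cost < m then (some cost, i) else best)
    (none, 0)
  match best.1 with
  | none => line
  | some _ =>
      String.ofList (List.replicate best.2.toNat '.' ++ List.replicate block_size.toNat '#'
        ++ List.replicate (n - block_size - best.2).toNat '.')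

-- ===== PRECONDITION & SPEC =====
-- Pre_ excludes negative block sizes: they are outside the task's natural domain
-- ("place a block of block_size cells"); there A's str.count negative-index wraparound
-- returns accidental strings and B's prefix-array lookups raise IndexError.
def Pre_change_line_py (line : String) (block_size : Int) : Prop := 0 ≤ block_size
instance (line : String) (block_size : Int) : Decidable (Pre_change_line_py line block_size) := by unfold Pre_change_line_py; infer_instance

def pvWitness_change_line_py : String × Int := ("#..#", 2)

def Spec_change_line_py (line : String) (block_size : Int) (out : String) : Prop := out = change_line_py_alt line block_size
instance (line : String) (block_size : Int) (out : String) : Decidable (Spec_change_line_py line block_size out) := by unfold Spec_change_line_py; infer_instance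

-- ===== CLAIM (what is proved, stated in full; the proofs are below) =====
def Claim_equal_change_line_py : Prop := ∀ (line : String) (block_size : Int), Dom_change_line_py line block_size → Pre_change_line_py line block_size → Spec_change_line_py line block_size (change_line_py line block_size)

-- ===== LEMMAS AND PROOFS =====

-- the list [count of ch in cs.take j | j = 0..cs.length]
def pvPrefList (cs : List Char) (ch : Char) : List Int :=
  (List.range (cs.length + 1)).map (fun j => ((cs.take j).count ch : Int))

def pvOut (build : Int → List Char) (dflt : List Char) : Option Int × Int → List Char
  | st => match st.1 with | none => dflt | some _ => build st.2

lemma pvPrefList_append (cs : List Char) (c ch : Char) :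
    pvPrefList (cs ++ [c]) ch
      = pvPrefList cs ch ++ [((cs.count ch : Int)) + (if c = ch then 1 else 0)] := by
  unfold pvPrefList
  rw [List.length_append, List.length_singleton]
  rw [show cs.length + 1 + 1 = (cs.length + 1) + 1 from rfl, List.range_succ, List.map_append]
  congr 1
  · apply List.map_congr_left
    intro j hj
    rw [List.mem_range] at hj
    rw [List.take_append_of_le_length (by omega)]
  · have : (cs ++ [c]).take (cs.length + 1) = cs ++ [c] := by
      rw [List.take_of_length_le (by simp)]
    rw [List.map_singleton, this, List.count_append]
    simp [List.count_singleton]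

lemma pvPrefs_eq (cs : List Char) :
    cs.foldl
      (fun (st : (Int × Int) × (List Int × List Int)) c =>
        let h := st.1.1 + (if c = '#' then 1 else 0)
        let d := st.1.2 + (if c = '.' then 1 else 0)
        ((h, d), (st.2.1 ++ [h], st.2.2 ++ [d])))
      ((0, 0), ([0], [0]))
    = (((cs.count '#' : Int), (cs.count '.' : Int)), (pvPrefList cs '#', pvPrefList cs '.')) := by
  induction cs using List.reverseRecOn with
  | nil => simp [pvPrefList]
  | append_singleton cs c ih =>
    rw [List.foldl_append, ih]
    simp only [List.foldl_cons, List.foldl_nil]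
    rw [pvPrefList_append cs c '#', pvPrefList_append cs c '.']
    simp [List.count_append, List.count_singleton]

lemma pvPrefList_getD (cs : List Char) (ch : Char) (k : Nat) (hk : k ≤ cs.length) :
    (pvPrefList cs ch).getD k 0 = ((cs.take k).count ch : Int) := by
  unfold pvPrefList
  rw [List.getD_eq_getElem?_getD, List.getElem?_map, List.getElem?_range (by omega)]
  simp

lemma pvCount_slice (cs : List Char) (ch : Char) (a b : Int)
    (h0 : 0 ≤ a) (hab : a ≤ b) (hb : b ≤ (cs.length : Int)) :
    ((PySem.List.slice cs (some a) (some b)).count ch : Int)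
      = (pvPrefList cs ch).getD b.toNat 0 - (pvPrefList cs ch).getD a.toNat 0 := by
  obtain ⟨a', rfl⟩ : ∃ a' : Nat, a = (a' : Int) := ⟨a.toNat, (Int.toNat_of_nonneg h0).symm⟩
  obtain ⟨b', rfl⟩ : ∃ b' : Nat, b = (b' : Int) := ⟨b.toNat, (Int.toNat_of_nonneg (le_trans h0 hab)).symm⟩
  have hab' : a' ≤ b' := by exact_mod_cast hab
  have hb' : b' ≤ cs.length := by exact_mod_cast hb
  rw [PySem.List.slice_natCast, Int.toNat_natCast, Int.toNat_natCast]
  rw [pvPrefList_getD cs ch b' hb', pvPrefList_getD cs ch a' (le_trans hab' hb')]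
  have hdecomp : cs.take b' = cs.take a' ++ (cs.drop a').take (b' - a') := by
    conv_lhs => rw [← List.take_append_drop a' (cs.take b')]
    rw [List.take_take, Nat.min_eq_left hab', List.drop_take]
  have hcount : (cs.take b').count ch
      = (cs.take a').count ch + ((cs.drop a').take (b' - a')).count ch := by
    conv_lhs => rw [hdecomp]
    rw [List.count_append]
  omega

-- A's per-position cost equals B's prefix-difference cost, given in-range bounds
lemma pvCost_eq (cs : List Char) (bs i : Int)
    (hi : 0 ≤ i) (hbs : 0 ≤ bs) (hub : i + bs ≤ (cs.length : Int)) :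
    ((PySem.List.slice cs (some 0) (some i)).count '#' : Int)
      + ((PySem.List.slice cs (some i) (some (i + bs))).count '.' : Int)
      + ((PySem.List.slice cs (some (bs + i)) (some (cs.length : Int))).count '#' : Int)
    = (pvPrefList cs '#').getD i.toNat 0
      + ((pvPrefList cs '.').getD (i + bs).toNat 0 - (pvPrefList cs '.').getD i.toNat 0)
      + ((pvPrefList cs '#').getD cs.length 0 - (pvPrefList cs '#').getD (i + bs).toNat 0) := by
  have hin : i ≤ (cs.length : Int) := by omega
  rw [pvCount_slice cs '#' 0 i le_rfl hi hin,
      pvCount_slice cs '.' i (i + bs) hi (by omega) hub,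
      show bs + i = i + bs from by omega,
      pvCount_slice cs '#' (i + bs) ((cs.length : Int)) (by omega) hub le_rfl]
  have h0 : (pvPrefList cs '#').getD (0 : Int).toNat 0 = 0 := by
    rw [show (0 : Int).toNat = 0 from rfl, pvPrefList_getD cs '#' 0 (by omega)]
    simp
  have hn : ((cs.length : Int)).toNat = cs.length := Int.toNat_natCast _
  rw [h0, hn]
  omega

lemma pvOut_ofList (build : Int → List Char) (line : String) (st : Option Int × Int) :
    String.ofList (pvOut build line.toList st)
      = match st.1 with
        | none => line
        | some _ => String.ofList (build st.2) := by
  obtain ⟨o, j⟩ := st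
  cases o <;> simp [pvOut, String.ofList_toList]

-- relation between A's fold (running min + best string) and B's fold (best cost + index)
lemma pvFold_rel (cost : Int → Int) (build : Int → List Char) (dflt : List Char)
    (l : List Int) (stA : Option Int × List Char) (stB : Option Int × Int)
    (h1 : stA.1 = stB.1)
    (h2 : stA.2 = pvOut build dflt stB) :
    (l.foldl
      (fun (st : Option Int × List Char) (i : Int) =>
        if (match st.1 with | none => true | some m => decide (cost i < m)) then
          (some (cost i), build i)
        else st) stA).2
    = pvOut build dflt (l.foldl
        (fun (best : Option Int × Int) (i : Int) =>
          match best.1 with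
          | none => (some (cost i), i)
          | some m => if cost i < m then (some (cost i), i) else best) stB) := by
  induction l generalizing stA stB with
  | nil => simpa using h2
  | cons i l ih =>
    obtain ⟨mo, fl⟩ := stA
    obtain ⟨mo', bi⟩ := stB
    simp only at h1 h2
    subst h1
    simp only [List.foldl_cons]
    cases mo with
    | none =>
      exact ih _ _ (by simp) (by simp [pvOut])
    | some m =>
      by_cases hlt : cost i < m
      · simp only [hlt, decide_true, if_true]
        exact ih _ _ (by simp) (by simp [pvOut])
      · simp only [hlt, decide_false, if_false]
        exact ih _ _ (by simp) (by simpa [pvOut] using h2)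

-- ===== VERDICT (by name: the statement is the Claim_ definition above) =====
theorem change_line_py_spec : Claim_equal_change_line_py := by
  intro line block_size _ hpre
  unfold Spec_change_line_py change_line_py change_line_py_alt
  dsimp only
  rw [pvPrefs_eq]
  dsimp only
  rw [PySem.List.foldl_congr_mem _ _
    (fun (st : Option Int × List Char) (i : Int) =>
      if (match st.1 with
          | none => true
          | some m => decide (((pvPrefList line.toList '#').getD i.toNat 0
              + ((pvPrefList line.toList '.').getD (i + block_size).toNat 0
                  - (pvPrefList line.toList '.').getD i.toNat 0)
              + ((pvPrefList line.toList '#').getD line.toList.length 0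
                  - (pvPrefList line.toList '#').getD (i + block_size).toNat 0)) < m)) then
        (some ((pvPrefList line.toList '#').getD i.toNat 0
              + ((pvPrefList line.toList '.').getD (i + block_size).toNat 0
                  - (pvPrefList line.toList '.').getD i.toNat 0)
              + ((pvPrefList line.toList '#').getD line.toList.length 0
                  - (pvPrefList line.toList '#').getD (i + block_size).toNat 0)),
         List.replicate i.toNat '.' ++ List.replicate block_size.toNat '#'
           ++ List.replicate ((line.toList.length : Int) - block_size - i).toNat '.')
      else st) _
    (by
      intro acc i hi
      rw [PySem.List.mem_pyRange_one] at hi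
      dsimp only
      rw [pvCost_eq line.toList block_size i hi.1 hpre (by omega)])]
  rw [pvFold_rel
    (fun i => (pvPrefList line.toList '#').getD i.toNat 0
      + ((pvPrefList line.toList '.').getD (i + block_size).toNat 0
          - (pvPrefList line.toList '.').getD i.toNat 0)
      + ((pvPrefList line.toList '#').getD line.toList.length 0
          - (pvPrefList line.toList '#').getD (i + block_size).toNat 0))
    (fun i => List.replicate i.toNat '.' ++ List.replicate block_size.toNat '#'
      ++ List.replicate ((line.toList.length : Int) - block_size - i).toNat '.')
    line.toList
    (PySem.List.pyRange 0 ((line.toList.length : Int) - block_size + 1))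
    (none, line.toList) (none, 0) rfl rfl]
  exact pvOut_ofList
    (fun i => List.replicate i.toNat '.' ++ List.replicate block_size.toNat '#'
      ++ List.replicate ((line.toList.length : Int) - block_size - i).toNat '.')
    line _
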